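-- pv_equiv track=rewrite | github.com/Nathan-1003/pythonProject | selenium/game1.py | judge_35710
-- ===== SOURCE A (Python) =====
-- def judge_35710(bets):
--     if len(bets) != 3:
--         return -1
--
--     parsed_bets = [int(item) for item in bets]
--
--     for bet in parsed_bets:
--         if bet <= 0 or bet >= 7:
--             return -1
--
--     total_sum = sum(parsed_bets)
--     check_numbers = [3, 5, 7, 9, 11, 13, 15, 17]
--
--     if total_sum in check_numbers:
--         return 1
--
--     return -1
-- ===== SOURCE B (Python) =====
-- def judge_35710(bets):
--     if len(bets) != 3:
--         return -1
--
--     def go(rest, odd):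
--         if not rest:
--             return 1 if odd else -1
--         v = int(rest[0])
--         if v < 1 or v > 6:
--             return -1
--         return go(rest[1:], odd != (v % 2 == 1))
--
--     return go(bets, False)
-- ===== Notes on version B (the rewrite author's own statement) =====
-- stated objective: alternative
-- what changed: A's staged passes (parse all bets into a list, then a range-check loop, then sum and membership in a hard-coded odd-sum table) are replaced by one recursive pass that parses, validates and toggles a parity accumulator per bet, deciding 1/-1 from the final parity with no list, no sum and no table; exact because for in-range bets the sum is odd iff an odd number of bets are odd, and the table is exactly the odd values in 3..18.
import Mathlib
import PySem

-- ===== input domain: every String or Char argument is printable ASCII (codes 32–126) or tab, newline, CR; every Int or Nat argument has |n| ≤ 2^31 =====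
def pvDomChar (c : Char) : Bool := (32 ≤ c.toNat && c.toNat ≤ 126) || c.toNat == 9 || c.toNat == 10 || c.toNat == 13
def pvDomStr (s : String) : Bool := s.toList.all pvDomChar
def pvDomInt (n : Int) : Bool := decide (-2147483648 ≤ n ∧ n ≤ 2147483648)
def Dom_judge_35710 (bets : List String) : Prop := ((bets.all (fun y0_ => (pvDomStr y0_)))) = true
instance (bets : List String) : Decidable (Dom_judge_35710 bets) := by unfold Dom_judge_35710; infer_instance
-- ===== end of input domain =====

-- B replaces A's staged passes (parse list, range loop, sum + odd-sum table) by one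
-- recursive pass with a parity-toggle accumulator (objective: alternative).

-- ===== PORT A =====
-- the for-loop with early 'return -1': true = some bet out of range
def pvBadBetA : List Int → Bool
  | [] => false
  | b :: rest => if b ≤ 0 ∨ b ≥ 7 then true else pvBadBetA rest

def judge_35710 (bets : List String) : Int :=
  if bets.length ≠ 3 then -1
  else
    match bets.mapM PySem.Int.ofStr? with
    | none => -1   -- int() raised ValueError; excluded by Pre_
    | some parsed =>
      if pvBadBetA parsed then -1
      else
        let totalSum := parsed.sum
        let checkNumbers : List Int := [3, 5, 7, 9, 11, 13, 15, 17]
        if checkNumbers.contains totalSum then 1 else -1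

-- ===== PORT B =====
-- B's inner recursive go(rest, odd): parse, bound-check, toggle parity, recurse
def pvGoB : List String → Bool → Int
  | [], odd => if odd then 1 else -1
  | s :: rest, odd =>
    match PySem.Int.ofStr? s with
    | none => -1   -- int() raised ValueError; excluded by Pre_
    | some v =>
      if v < 1 ∨ v > 6 then -1
      else pvGoB rest (odd != decide (PySem.Int.mod v 2 = 1))

def judge_35710_alt (bets : List String) : Int :=
  if bets.length ≠ 3 then -1 else pvGoB bets false

-- ===== PRECONDITION & SPEC =====
-- Pre_ excludes exactly the inputs where int() raises ValueError in both A and B: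
-- a list of length 3 containing a string that does not parse as a Python int.
def Pre_judge_35710 (bets : List String) : Prop :=
  bets.length ≠ 3 ∨ ∀ s ∈ bets, (PySem.Int.ofStr? s).isSome
instance (bets : List String) : Decidable (Pre_judge_35710 bets) := by
  unfold Pre_judge_35710; infer_instance

def pvWitness_judge_35710 : List String := ["1", "2", "3"]

def Spec_judge_35710 (bets : List String) (out : Int) : Prop := out = judge_35710_alt bets
instance (bets : List String) (out : Int) : Decidable (Spec_judge_35710 bets out) := by unfold Spec_judge_35710; infer_instance

-- ===== CLAIM (what is proved, stated in full; the proofs are below) =====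
def Claim_equal_judge_35710 : Prop := ∀ (bets : List String), Dom_judge_35710 bets → Pre_judge_35710 bets → Spec_judge_35710 bets (judge_35710 bets)

-- ===== LEMMAS AND PROOFS =====

theorem judge_agree (x y z : Int) (s t u : String)
    (hx : PySem.Int.ofStr? s = some x) (hy : PySem.Int.ofStr? t = some y)
    (hz : PySem.Int.ofStr? u = some z) :
    (if pvBadBetA [x, y, z] then (-1 : Int)
     else if ([3, 5, 7, 9, 11, 13, 15, 17] : List Int).contains ([x, y, z].sum) then 1 else -1)
  = pvGoB [s, t, u] false := by
  simp only [pvGoB, hx, hy, hz]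
  by_cases h1 : x < 1 ∨ x > 6
  · rw [if_pos h1, if_pos (show pvBadBetA [x, y, z] = true by simp [pvBadBetA]; omega)]
  · rw [if_neg h1]
    by_cases h2 : y < 1 ∨ y > 6
    · rw [if_pos h2, if_pos (show pvBadBetA [x, y, z] = true by simp [pvBadBetA]; omega)]
    · rw [if_neg h2]
      by_cases h3 : z < 1 ∨ z > 6
      · rw [if_pos h3, if_pos (show pvBadBetA [x, y, z] = true by simp [pvBadBetA]; omega)]
      · rw [if_neg h3]
        rw [if_neg (show ¬ pvBadBetA [x, y, z] = true by simp [pvBadBetA]; omega)]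
        simp only [List.contains_eq_mem, List.sum_cons, List.sum_nil, List.mem_cons,
          List.not_mem_nil, or_false, add_zero,
          PySem.Int.mod_eq_emod_of_pos (by norm_num : (0:Int) < 2)]
        rcases Int.emod_two_eq x with px | px <;> rcases Int.emod_two_eq y with py | py <;>
          rcases Int.emod_two_eq z with pz | pz <;>
            simp only [px, py, pz, decide_eq_true_eq] <;>
            norm_num <;> omega

-- ===== VERDICT (by name: the statement is the Claim_ definition above) =====
theorem judge_35710_spec : Claim_equal_judge_35710 := by
  intro bets _ hpre
  unfold Spec_judge_35710 judge_35710 judge_35710_alt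
  by_cases hlen : bets.length ≠ 3
  · simp [hlen]
  · rw [not_not] at hlen
    match bets, hlen with
    | [a, b, c], _ =>
      rcases hpre with h | h
      · simp at h
      · obtain ⟨x, hx⟩ := Option.isSome_iff_exists.mp (h a (by simp))
        obtain ⟨y, hy⟩ := Option.isSome_iff_exists.mp (h b (by simp))
        obtain ⟨z, hz⟩ := Option.isSome_iff_exists.mp (h c (by simp))
        simpa [List.mapM_cons, hx, hy, hz] using judge_agree x y z a b c hx hy hz
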